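-- pv_equiv track=rewrite | github.com/BudarinPavel/algorithms | yan_algorithm_training_1/l5.py | count_prefix_sums
-- ===== SOURCE A (Python) =====
-- def count_prefix_sums(nums):
--     prefix_sum_by_value = {0: 1}
--     now_sum = 0
--     for now in nums:
--         now_sum += now
--         if now_sum not in prefix_sum_by_value:
--             prefix_sum_by_value[now_sum] = 0
--         prefix_sum_by_value[now_sum] += 1
--     return prefix_sum_by_value
-- ===== SOURCE B (Python) =====
-- def count_prefix_sums(nums):
--     # materialize all prefix sums (including the initial 0)
--     prefixes = [0]
--     s = 0
--     for x in nums: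
--         s += x
--         prefixes.append(s)
--     # distinct prefix values in first-occurrence order
--     seen = []
--     for p in prefixes:
--         if p not in seen:
--             seen.append(p)
--     # per-key count by scanning the prefix list (no incremental tally)
--     return {v: prefixes.count(v) for v in seen}
-- ===== Notes on version B (the rewrite author's own statement) =====
-- stated objective: alternative
-- what changed: A tallies incrementally into a dict while accumulating; B materializes the prefix-sum list, dedups it into a first-occurrence key list, and computes each key's count by an independent list.count scan - no running counter dict at all.
import Mathlib
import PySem

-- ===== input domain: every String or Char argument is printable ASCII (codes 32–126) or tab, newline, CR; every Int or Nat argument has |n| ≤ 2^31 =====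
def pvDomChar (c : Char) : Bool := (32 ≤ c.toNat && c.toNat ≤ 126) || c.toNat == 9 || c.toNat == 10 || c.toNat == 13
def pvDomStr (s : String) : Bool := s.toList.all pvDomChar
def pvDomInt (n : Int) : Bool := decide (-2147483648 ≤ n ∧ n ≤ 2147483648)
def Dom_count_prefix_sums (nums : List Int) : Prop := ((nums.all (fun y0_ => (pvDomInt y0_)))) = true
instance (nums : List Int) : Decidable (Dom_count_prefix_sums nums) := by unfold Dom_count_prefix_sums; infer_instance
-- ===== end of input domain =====

-- B drops A's incremental dict tally: it materializes the prefix-sum list, dedups it into a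
-- first-occurrence key list, and counts each key by a separate list scan.

-- ===== PORT A =====
def count_prefix_sums (nums : List Int) : List (Int × Int) :=
  let res := nums.foldl (fun (st : PySem.Dict Int Int × Int) now =>
      let now_sum := st.2 + now
      let d := if st.1.contains now_sum then st.1 else st.1.insert now_sum 0
      (d.modify now_sum 0 (· + 1), now_sum))
    (PySem.Dict.ofList [((0 : Int), (1 : Int))], 0)
  res.1.items

-- ===== PORT B =====
def count_prefix_sums_alt (nums : List Int) : List (Int × Int) :=
  let pr := nums.foldl (fun (st : List Int × Int) x =>
      let s := st.2 + x
      (st.1 ++ [s], s)) ([0], 0)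
  let prefixes := pr.1
  let seen : PySem.Set Int := prefixes.foldl PySem.Set.add []
  seen.map (fun v => (v, (prefixes.count v : Int)))

-- ===== PRECONDITION & SPEC =====
def Spec_count_prefix_sums (nums : List Int) (out : List (Int × Int)) : Prop := out = count_prefix_sums_alt nums
instance (nums : List Int) (out : List (Int × Int)) : Decidable (Spec_count_prefix_sums nums out) := by unfold Spec_count_prefix_sums; infer_instance

-- ===== CLAIM (what is proved, stated in full; the proofs are below) =====
def Claim_equal_count_prefix_sums : Prop := ∀ (nums : List Int), Dom_count_prefix_sums nums → Spec_count_prefix_sums nums (count_prefix_sums nums)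

-- ===== LEMMAS AND PROOFS =====

-- A's membership-test-then-increment is one counting modify.
theorem stepA_eq_modify (d : PySem.Dict Int Int) (s : Int) :
    (if d.contains s then d else d.insert s 0).modify s 0 (· + 1)
      = d.modify s 0 (· + 1) := by
  by_cases h : d.contains s = true
  · simp [h]
  · simp only [Bool.not_eq_true] at h
    simp [h, PySem.Dict.modify, PySem.Dict.getD_insert_self,
      PySem.Dict.insert_insert_self, PySem.Dict.getD_of_not_contains]

-- the running prefix sums starting from s
def runSums (s : Int) : List Int → List Int
  | [] => []
  | x :: xs => (s + x) :: runSums (s + x) xs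

-- A's fold is the Counter fold over the running prefix sums.
theorem foldA_eq (nums : List Int) (d : PySem.Dict Int Int) (s : Int) :
    (nums.foldl (fun (st : PySem.Dict Int Int × Int) now =>
      let now_sum := st.2 + now
      let d := if st.1.contains now_sum then st.1 else st.1.insert now_sum 0
      (d.modify now_sum 0 (· + 1), now_sum)) (d, s)).1
    = (runSums s nums).foldl (fun (d : PySem.Dict Int Int) p => d.modify p 0 (· + 1)) d := by
  induction nums generalizing d s with
  | nil => rfl
  | cons x xs ih =>
      simp only [List.foldl_cons, runSums]
      rw [stepA_eq_modify]
      exact ih _ _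

-- B's first pass builds 0 :: runSums 0 nums.
theorem foldB_eq (nums : List Int) (acc : List Int) (s : Int) :
    (nums.foldl (fun (st : List Int × Int) x =>
      let t := st.2 + x
      (st.1 ++ [t], t)) (acc, s)).1 = acc ++ runSums s nums := by
  induction nums generalizing acc s with
  | nil => simp [runSums]
  | cons x xs ih =>
      simp only [List.foldl, runSums]
      rw [ih]
      simp

-- ===== VERDICT (by name: the statement is the Claim_ definition above) =====
theorem count_prefix_sums_spec : Claim_equal_count_prefix_sums := by
  intro nums _
  show count_prefix_sums nums = count_prefix_sums_alt nums
  simp only [count_prefix_sums, count_prefix_sums_alt, foldA_eq, foldB_eq,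
    List.singleton_append]
  have hA : (PySem.Dict.ofList [((0 : Int), (1 : Int))])
      = PySem.Dict.empty.modify (0 : Int) 0 (· + 1) := by decide
  rw [hA, ← List.foldl_cons, ← PySem.Dict.counter_eq_foldl,
    PySem.Dict.items_counter, ← PySem.Set.ofList_eq_foldl]
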